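-- pv_equiv track=rewrite | github.com/HanzhangYin/forward_stability | grassmannian.py | _avoids_patterns
-- ===== SOURCE A (Python) =====
-- from itertools import combinations
--
-- def _standardize(seq):
--     order = {val: rank for rank, val in enumerate(sorted(seq), start=1)}
--     return tuple(order[val] for val in seq)
--
-- def _avoids_patterns(perm, patterns):
--     perm_list = list(perm)
--     n = len(perm_list)
--     for pattern_len, pattern_std in patterns:
--         for positions in combinations(range(n), pattern_len):
--             subseq = [perm_list[i] for i in positions]
--             if _standardize(subseq) == pattern_std:
--                 return False
--     return True
-- ===== SOURCE B (Python) =====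
-- from itertools import combinations
--
--
-- def _avoids_patterns(perm, patterns):
--     # Group the patterns by length once, so each subsequence length is
--     # enumerated a single time and matching is one set-membership test.
--     by_len = {}
--     for length, std in patterns:
--         by_len.setdefault(length, set()).add(tuple(std))
--     vals = tuple(perm)
--     for length, stds in by_len.items():
--         for sub in combinations(vals, length):
--             # counting standardization: rank of v = #elements <= v
--             if tuple(sum(1 for w in sub if w <= v) for v in sub) in stds:
--                 return False
--     return True
-- ===== Notes on version B (the rewrite author's own statement) =====
-- stated objective: alternative
-- what changed: B groups the patterns by length into a dict of sets so each subsequence length is enumerated once with a set-membership test (instead of re-enumerating all combinations per pattern), takes combinations of the permutation's values directly instead of index tuples, and standardizes by counting elements <= v instead of building a rank dict from a sort.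
-- outside the precondition, e.g. on _avoids_patterns((1,), [(1, (1,)), (-1, ())]): A returns False, B returns False
import Mathlib
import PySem

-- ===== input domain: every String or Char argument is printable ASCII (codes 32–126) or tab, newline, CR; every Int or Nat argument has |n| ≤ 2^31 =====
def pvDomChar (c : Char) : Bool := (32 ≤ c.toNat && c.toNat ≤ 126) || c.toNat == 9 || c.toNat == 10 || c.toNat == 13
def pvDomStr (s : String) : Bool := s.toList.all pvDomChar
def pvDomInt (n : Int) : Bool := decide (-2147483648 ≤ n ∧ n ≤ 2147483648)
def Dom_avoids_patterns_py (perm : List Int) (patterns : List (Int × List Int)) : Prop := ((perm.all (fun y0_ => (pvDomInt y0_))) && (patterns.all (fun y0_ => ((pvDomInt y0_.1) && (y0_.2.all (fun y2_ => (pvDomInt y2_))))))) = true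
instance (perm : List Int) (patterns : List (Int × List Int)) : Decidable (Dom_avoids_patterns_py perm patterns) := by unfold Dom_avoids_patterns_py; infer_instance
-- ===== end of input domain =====

-- B groups the patterns by length in a dict of sets (one combinations pass per
-- distinct length, set-membership test) and standardizes by counting elements ≤ v
-- instead of A's sort-and-rank dict; objective: alternative decomposition.

-- shared library helper: itertools.combinations(xs, k) (both Pythons call it),
-- in itertools' lexicographic order
def pyCombs {α : Type} : Nat → List α → List (List α)
  | 0, _ => [[]]
  | _ + 1, [] => []
  | k + 1, x :: xs => (pyCombs k xs).map (fun t => x :: t) ++ pyCombs (k + 1) xs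

-- ===== PORT A =====
-- _standardize: dict {val: rank} from enumerate(sorted(seq), start=1), then look each
-- value up.  order[val] always hits (val ∈ seq), so getD's default 0 is unreachable.
def standardize_a (seq : List Int) : List Int :=
  let order : PySem.Dict Int Int :=
    (PySem.List.enumerate (PySem.List.sorted seq (fun v => v) false) 1).foldl
      (fun d p => d.insert p.2 p.1) PySem.Dict.empty
  seq.map (fun v => order.getD v 0)

-- outer loop over patterns with early return False; the inner 'for positions in
-- combinations(range(n), pattern_len): if …: return False' is the .any.
-- plen.toNat is exact for plen ≥ 0 (Pre_); Python's combinations raises ValueError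
-- on a negative r, which Pre_ excludes.
def avoids_patterns_py_go (perm_list : List Int) (n : Int) : List (Int × List Int) → Bool
  | [] => true
  | (plen, pstd) :: rest =>
    if (pyCombs plen.toNat (PySem.List.pyRange 0 n 1)).any
        (fun pos => standardize_a (pos.map (fun i => PySem.List.pyGetD perm_list i 0)) == pstd)
    then false
    else avoids_patterns_py_go perm_list n rest

def avoids_patterns_py (perm : List Int) (patterns : List (Int × List Int)) : Bool :=
  avoids_patterns_py_go perm (PySem.List.len perm) patterns

-- ===== PORT B =====
-- counting standardization: rank of v = number of elements ≤ v
def standardize_b (sub : List Int) : List Int :=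
  sub.map (fun v => (sub.countP (fun w => decide (w ≤ v)) : Int))

-- by_len.setdefault(length, set()).add(tuple(std)): net effect on the dict is an
-- insert at `length` of the old set (default empty) with std added; PySem's insert
-- keeps the key's position on overwrite, like Python.
def by_len_dict (patterns : List (Int × List Int)) : PySem.Dict Int (PySem.Set (List Int)) :=
  patterns.foldl
    (fun d p => d.insert p.1 (PySem.Set.add (d.getD p.1 PySem.Set.empty) p.2))
    PySem.Dict.empty

-- loop over the dict's items (insertion order) with early return False.
-- len.toNat is exact for len ≥ 0 (Pre_).
def avoids_patterns_py_alt_go (vals : List Int) : List (Int × PySem.Set (List Int)) → Bool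
  | [] => true
  | (len, stds) :: rest =>
    if (pyCombs len.toNat vals).any (fun sub => PySem.Set.contains stds (standardize_b sub))
    then false
    else avoids_patterns_py_alt_go vals rest

def avoids_patterns_py_alt (perm : List Int) (patterns : List (Int × List Int)) : Bool :=
  avoids_patterns_py_alt_go perm (by_len_dict patterns).items

-- ===== PRECONDITION & SPEC =====
-- Pre_ excludes patterns carrying a negative length: combinations(range(n), r) raises
-- ValueError for r < 0 (in A as soon as such a pattern is reached; the rare inputs
-- where an earlier pattern already matched are also excluded — see claim cites).
def Pre_avoids_patterns_py (perm : List Int) (patterns : List (Int × List Int)) : Prop :=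
  ∀ p ∈ patterns, 0 ≤ p.1
instance (perm : List Int) (patterns : List (Int × List Int)) : Decidable (Pre_avoids_patterns_py perm patterns) := by unfold Pre_avoids_patterns_py; infer_instance

def pvWitness_avoids_patterns_py : List Int × (List (Int × List Int)) :=
  ([2, 1, 3], [(2, [1, 2]), (3, [3, 2, 1])])

def Spec_avoids_patterns_py (perm : List Int) (patterns : List (Int × List Int)) (out : Bool) : Prop := out = avoids_patterns_py_alt perm patterns
instance (perm : List Int) (patterns : List (Int × List Int)) (out : Bool) : Decidable (Spec_avoids_patterns_py perm patterns out) := by unfold Spec_avoids_patterns_py; infer_instance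

-- ===== CLAIM (what is proved, stated in full; the proofs are below) =====
def Claim_equal_avoids_patterns_py : Prop := ∀ (perm : List Int) (patterns : List (Int × List Int)), Dom_avoids_patterns_py perm patterns → Pre_avoids_patterns_py perm patterns → Spec_avoids_patterns_py perm patterns (avoids_patterns_py perm patterns)

-- ===== LEMMAS AND PROOFS =====

-- the rank dict built from an enumeration never touches keys outside the list
theorem getD_rank_fold_not_mem (s : List Int) (k : Int) (d : PySem.Dict Int Int)
    (v : Int) (hv : v ∉ s) :
    ((PySem.List.enumerate s k).foldl (fun d p => d.insert p.2 p.1) d).getD v 0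
      = d.getD v 0 := by
  induction s generalizing k d with
  | nil => simp [PySem.List.enumerate_nil]
  | cons x xs ih =>
    rw [PySem.List.enumerate_cons]
    simp only [List.foldl_cons]
    rw [ih _ _ (fun h => hv (List.mem_cons_of_mem _ h))]
    rw [PySem.Dict.getD_eq_get?_getD,
      PySem.Dict.get?_insert_of_ne _ _ (by rintro rfl; exact hv List.mem_cons_self),
      ← PySem.Dict.getD_eq_get?_getD]

-- on a sorted list the rank dict sends v to start + #{w ≤ v} - 1 (the last rank wins)
theorem getD_rank_fold_mem (s : List Int) : ∀ (k : Int) (d : PySem.Dict Int Int)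
    (v : Int), s.Pairwise (· ≤ ·) → v ∈ s →
    ((PySem.List.enumerate s k).foldl (fun d p => d.insert p.2 p.1) d).getD v 0
      = k + (s.countP (fun w => decide (w ≤ v)) : Int) - 1 := by
  induction s with
  | nil => intro k d v _ hv; cases hv
  | cons x xs ih =>
    intro k d v hs hv
    rw [PySem.List.enumerate_cons]
    simp only [List.foldl_cons]
    have hp := (List.pairwise_cons.mp hs).2
    have hx : ∀ y ∈ xs, x ≤ y := (List.pairwise_cons.mp hs).1
    by_cases hmem : v ∈ xs
    · rw [ih (k + 1) (d.insert x k) v hp hmem]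
      have hxv : x ≤ v := hx v hmem
      rw [List.countP_cons]
      simp only [hxv, decide_true]
      push_cast; ring
    · have hvx : v = x := by rcases List.mem_cons.mp hv with h | h; exact h; exact absurd h hmem
      subst hvx
      rw [getD_rank_fold_not_mem _ _ _ _ hmem, PySem.Dict.getD_insert_self]
      have h0 : xs.countP (fun w => decide (w ≤ v)) = 0 := by
        apply List.countP_eq_zero.mpr
        intro w hw
        simp only [decide_eq_true_eq]
        intro hle
        exact hmem (le_antisymm (hx w hw) hle ▸ hw)
      rw [List.countP_cons, h0]
      simp only [le_refl, decide_true]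
      push_cast; ring

-- A's sort-and-rank standardization equals B's counting standardization
theorem standardize_a_eq_b (seq : List Int) : standardize_a seq = standardize_b seq := by
  unfold standardize_a standardize_b
  apply List.map_congr_left
  intro v hv
  have hmem : v ∈ PySem.List.sorted seq (fun v => v) false :=
    (PySem.List.mem_sorted _ _ _ _).mpr hv
  rw [getD_rank_fold_mem _ 1 _ v (PySem.List.sorted_pairwise seq (fun v => v)) hmem]
  rw [(PySem.List.sorted_perm seq (fun v => v) false).countP_eq]
  ring

-- combinations commute with mapping a function over the pool
theorem pyCombs_map {α β : Type} (f : α → β) (xs : List α) : ∀ (k : Nat),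
    pyCombs k (xs.map f) = (pyCombs k xs).map (List.map f) := by
  induction xs with
  | nil => intro k; cases k <;> simp [pyCombs]
  | cons x xs ih =>
    intro k
    cases k with
    | zero => simp [pyCombs]
    | succ k => simp [pyCombs, ih, List.map_map, Function.comp_def]

-- the early-return loops are Boolean "no pattern hits"
theorem go_a_eq_not_any (perm_list : List Int) (n : Int) (pats : List (Int × List Int)) :
    avoids_patterns_py_go perm_list n pats
      = !(pats.any (fun p => (pyCombs p.1.toNat (PySem.List.pyRange 0 n 1)).any
          (fun pos => standardize_a (pos.map (fun i => PySem.List.pyGetD perm_list i 0)) == p.2))) := by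
  induction pats with
  | nil => rfl
  | cons p rest ih =>
    rcases p with ⟨plen, pstd⟩
    rw [avoids_patterns_py_go, List.any_cons]
    split_ifs with h
    · simp only [h, Bool.true_or, Bool.not_true]
    · rw [Bool.eq_false_iff.mpr h, Bool.false_or, ih]

theorem go_b_eq_not_any (vals : List Int) (items : List (Int × PySem.Set (List Int))) :
    avoids_patterns_py_alt_go vals items
      = !(items.any (fun q => (pyCombs q.1.toNat vals).any
          (fun sub => PySem.Set.contains q.2 (standardize_b sub)))) := by
  induction items with
  | nil => rfl
  | cons q rest ih =>
    rcases q with ⟨len, stds⟩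
    rw [avoids_patterns_py_alt_go, List.any_cons]
    split_ifs with h
    · simp only [h, Bool.true_or, Bool.not_true]
    · rw [Bool.eq_false_iff.mpr h, Bool.false_or, ih]

-- membership in a getD-with-empty-default lookup is a get?-existential
theorem mem_getD_iff (d : PySem.Dict Int (PySem.Set (List Int))) (l : Int) (s : List Int) :
    (∃ S, d.get? l = some S ∧ s ∈ S) ↔ s ∈ d.getD l PySem.Set.empty := by
  rw [PySem.Dict.getD_eq_get?_getD]
  cases hg : d.get? l <;> simp [PySem.Set.empty]

-- grouping invariant: membership in the by-length dict is membership in patterns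
theorem by_len_fold_get (pats : List (Int × List Int)) :
    ∀ (d : PySem.Dict Int (PySem.Set (List Int))) (l : Int) (s : List Int),
    s ∈ ((pats.foldl
        (fun d p => d.insert p.1 (PySem.Set.add (d.getD p.1 PySem.Set.empty) p.2)) d).getD l
          PySem.Set.empty)
      ↔ ((l, s) ∈ pats ∨ s ∈ d.getD l PySem.Set.empty) := by
  induction pats with
  | nil => simp
  | cons p rest ih =>
    rcases p with ⟨l0, s0⟩
    intro d l s
    rw [List.foldl_cons, ih, PySem.Dict.getD_insert]
    by_cases hl : l = l0
    · subst hl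
      simp only [List.mem_cons, Prod.mk.injEq, true_and, if_pos trivial, PySem.Set.mem_add]
      tauto
    · simp only [List.mem_cons, Prod.mk.injEq, hl, false_and]
      tauto

theorem by_len_dict_mem (pats : List (Int × List Int)) (l : Int) (s : List Int) :
    (∃ S, (by_len_dict pats).get? l = some S ∧ s ∈ S) ↔ (l, s) ∈ pats := by
  rw [mem_getD_iff, by_len_dict, by_len_fold_get]
  simp [PySem.Dict.getD_empty, PySem.Set.empty]

theorem by_len_dict_nodup_keys (pats : List (Int × List Int)) :
    (by_len_dict pats).keys.Nodup := by
  exact PySem.Dict.nodup_keys_foldl_insert_key pats Prod.fst _ _ (by simp [PySem.Dict.keys_empty])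

-- A's inner any over index tuples is B's any over value subsequences
theorem inner_any_eq (perm : List Int) (k : Nat) (pstd : List Int) :
    (pyCombs k (PySem.List.pyRange 0 (PySem.List.len perm) 1)).any
        (fun pos => standardize_a (pos.map (fun i => PySem.List.pyGetD perm i 0)) == pstd)
      = (pyCombs k perm).any (fun sub => standardize_b sub == pstd) := by
  have h1 : (pyCombs k ((PySem.List.pyRange 0 (PySem.List.len perm) 1).map
      (fun i => PySem.List.pyGetD perm i 0))).any (fun sub => standardize_b sub == pstd)
      = (pyCombs k perm).any (fun sub => standardize_b sub == pstd) := by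
    rw [show (PySem.List.pyRange 0 (PySem.List.len perm) 1).map (fun i => PySem.List.pyGetD perm i 0) = perm
      from PySem.List.map_pyGetD_pyRange_zero perm 0]
  rw [← h1, pyCombs_map, List.any_map]
  congr 1
  funext pos
  simp [standardize_a_eq_b]

-- ===== VERDICT (by name: the statement is the Claim_ definition above) =====
theorem avoids_patterns_py_spec : Claim_equal_avoids_patterns_py := by
  intro perm patterns _ _
  unfold Spec_avoids_patterns_py avoids_patterns_py avoids_patterns_py_alt
  rw [go_a_eq_not_any, go_b_eq_not_any]
  congr 1
  rw [Bool.eq_iff_iff, List.any_eq_true, List.any_eq_true]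
  constructor
  · rintro ⟨p, hp, hhit⟩
    rw [inner_any_eq] at hhit
    rcases List.any_eq_true.mp hhit with ⟨sub, hsub, heq⟩
    have hmemp : (p.1, p.2) ∈ patterns := by simpa using hp
    rcases (by_len_dict_mem patterns p.1 p.2).mpr hmemp with ⟨S, hS, hmemS⟩
    refine ⟨(p.1, S), PySem.Dict.mem_items_of_get?_eq_some _ hS, ?_⟩
    apply List.any_eq_true.mpr
    refine ⟨sub, hsub, ?_⟩
    apply (PySem.Set.contains_iff _ _).mpr
    rwa [(beq_iff_eq).mp heq]
  · rintro ⟨⟨l, S⟩, hq, hhit⟩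
    rcases List.any_eq_true.mp hhit with ⟨sub, hsub, hcont⟩
    have hget : (by_len_dict patterns).get? l = some S :=
      PySem.Dict.get?_of_mem_items _ hq (by_len_dict_nodup_keys patterns)
    have hmem : (l, standardize_b sub) ∈ patterns :=
      (by_len_dict_mem patterns l (standardize_b sub)).mp
        ⟨S, hget, (PySem.Set.contains_iff _ _).mp hcont⟩
    refine ⟨(l, standardize_b sub), hmem, ?_⟩
    rw [inner_any_eq]
    exact List.any_eq_true.mpr ⟨sub, hsub, by simp⟩
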